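-- pv_equiv track=rewrite | github.com/keokukzh/AIAPP-Finisher | ui/components/analysis_dashboard.py | _get_project_type
-- ===== SOURCE A (Python) =====
-- def _get_project_type(frameworks: list) -> str:
--     """Bestimmt den Projekttyp basierend auf Frameworks"""
--     if not frameworks:
--         return "unbekanntes Projekt"
--
--     framework_types = [f.get("type", "").lower() for f in frameworks]
--
--     if "backend" in framework_types and "frontend" in framework_types:
--         return "Full-Stack-Projekt"
--     elif "backend" in framework_types:
--         return "Backend-Projekt"
--     elif "frontend" in framework_types:
--         return "Frontend-Projekt"
--     else:
--         return "Projekt"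
-- ===== SOURCE B (Python) =====
-- _BIT = {"backend": 1, "frontend": 2}
-- _RESULT = ["Projekt", "Backend-Projekt", "Frontend-Projekt", "Full-Stack-Projekt"]
--
-- def _get_project_type(frameworks: list) -> str:
--     """Bestimmt den Projekttyp basierend auf Frameworks"""
--     if not frameworks:
--         return "unbekanntes Projekt"
--     mask = 0
--     for f in frameworks:
--         mask |= _BIT.get(f.get("type", "").lower(), 0)
--     return _RESULT[mask]
-- ===== Notes on version B (the rewrite author's own statement) =====
-- stated objective: alternative
-- what changed: Replaced the build-list-of-types-plus-four-membership-scans and if/elif chain with a bitmask fold (backend=bit 0, frontend=bit 1) whose value directly indexes a 4-entry result table, eliminating both the intermediate list and the branch chain.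
import Mathlib
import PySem

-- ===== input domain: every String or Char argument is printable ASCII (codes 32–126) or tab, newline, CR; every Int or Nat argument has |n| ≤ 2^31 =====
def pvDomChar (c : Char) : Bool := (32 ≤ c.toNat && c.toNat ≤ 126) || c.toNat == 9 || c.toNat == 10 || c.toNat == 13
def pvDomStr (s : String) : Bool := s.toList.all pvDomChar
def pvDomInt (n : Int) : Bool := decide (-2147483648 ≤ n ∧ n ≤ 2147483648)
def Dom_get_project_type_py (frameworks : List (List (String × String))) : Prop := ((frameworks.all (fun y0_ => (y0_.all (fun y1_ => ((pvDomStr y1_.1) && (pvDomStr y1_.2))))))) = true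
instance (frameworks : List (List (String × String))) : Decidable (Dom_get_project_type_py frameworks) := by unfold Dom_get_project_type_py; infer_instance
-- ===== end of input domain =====

-- B replaces A's list-of-types + four membership scans + if/elif chain with a bitmask
-- fold (backend=1, frontend=2) indexing a 4-entry result table; objective: alternative.


-- shared helper: f.get("type", "").lower()
def pvFwType (f : List (String × String)) : String :=
  PySem.Str.lower ((PySem.Dict.mk f).getD "type" "")

-- ===== PORT A =====
def get_project_type_py (frameworks : List (List (String × String))) : String :=
  if frameworks = [] then "unbekanntes Projekt"
  else
    let framework_types := frameworks.map pvFwType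
    if framework_types.contains "backend" && framework_types.contains "frontend" then
      "Full-Stack-Projekt"
    else if framework_types.contains "backend" then "Backend-Projekt"
    else if framework_types.contains "frontend" then "Frontend-Projekt"
    else "Projekt"

-- ===== PORT B =====
-- _BIT.get(t, 0)
def pvBit (f : List (String × String)) : Nat :=
  (PySem.Dict.mk [("backend", 1), ("frontend", 2)]).getD (pvFwType f) 0

def pvResultTable : List String :=
  ["Projekt", "Backend-Projekt", "Frontend-Projekt", "Full-Stack-Projekt"]

def get_project_type_py_alt (frameworks : List (List (String × String))) : String :=
  if frameworks = [] then "unbekanntes Projekt"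
  else
    let mask := frameworks.foldl (fun m f => m ||| pvBit f) 0
    -- _RESULT[mask]: mask ∈ {0,1,2,3} always, so plain indexing is exact here
    pvResultTable.getD mask ""

-- ===== PRECONDITION & SPEC =====
def Spec_get_project_type_py (frameworks : List (List (String × String))) (out : String) : Prop := out = get_project_type_py_alt frameworks
instance (frameworks : List (List (String × String))) (out : String) : Decidable (Spec_get_project_type_py frameworks out) := by unfold Spec_get_project_type_py; infer_instance

-- ===== CLAIM (what is proved, stated in full; the proofs are below) =====
def Claim_equal_get_project_type_py : Prop := ∀ (frameworks : List (List (String × String))), Dom_get_project_type_py frameworks → Spec_get_project_type_py frameworks (get_project_type_py frameworks)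

-- ===== LEMMAS AND PROOFS =====

-- the mask encodes exactly the two memberships A tests
def pvEnc (xs : List (List (String × String))) : Nat :=
  (if (xs.map pvFwType).contains "backend" then 1 else 0) |||
  (if (xs.map pvFwType).contains "frontend" then 2 else 0)

theorem pvBit_eq (f : List (String × String)) :
    pvBit f = if pvFwType f = "backend" then 1 else if pvFwType f = "frontend" then 2 else 0 := by
  unfold pvBit
  by_cases hB : pvFwType f = "backend"
  · simp [hB, PySem.Dict.getD, PySem.Dict.get?, PySem.Dict.mk, List.find?]
  · have hB' : ("backend" == pvFwType f) = false := by
      simp [beq_iff_eq]; exact fun h => hB h.symm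
    by_cases hF : pvFwType f = "frontend"
    · simp [hB, hF, hB', PySem.Dict.getD, PySem.Dict.get?, PySem.Dict.mk, List.find?]
    · have hF' : ("frontend" == pvFwType f) = false := by
        simp [beq_iff_eq]; exact fun h => hF h.symm
      simp [hB, hF, hB', hF', PySem.Dict.getD, PySem.Dict.get?, PySem.Dict.mk, List.find?]

theorem pvFold_spec (xs : List (List (String × String))) (a : Nat) :
    xs.foldl (fun m f => m ||| pvBit f) a = a ||| pvEnc xs := by
  induction xs generalizing a with
  | nil => simp [pvEnc]
  | cons f rest ih =>
    simp only [List.foldl_cons, ih, pvEnc, List.map_cons, List.contains_cons]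
    rw [pvBit_eq]
    by_cases hB : pvFwType f = "backend" <;> by_cases hF : pvFwType f = "frontend" <;>
      (try have hB' : ¬ "backend" = pvFwType f := fun h => hB h.symm) <;>
      (try have hF' : ¬ "frontend" = pvFwType f := fun h => hF h.symm) <;>
      rcases hcb : (rest.map pvFwType).contains "backend" <;>
      rcases hcf : (rest.map pvFwType).contains "frontend" <;>
      simp_all [Nat.or_assoc]

-- ===== VERDICT (by name: the statement is the Claim_ definition above) =====
theorem get_project_type_py_spec : Claim_equal_get_project_type_py := by
  intro frameworks _
  unfold Spec_get_project_type_py get_project_type_py get_project_type_py_alt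
  by_cases h : frameworks = []
  · simp [h]
  · simp only [h, if_false, pvFold_spec]
    rcases hcb : (frameworks.map pvFwType).contains "backend" <;>
      rcases hcf : (frameworks.map pvFwType).contains "frontend" <;>
      simp only [pvEnc, hcb, hcf] <;> simp [pvResultTable]
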